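-- pv_equiv track=rewrite | github.com/lioneltashi/csf_testagain | exercise 9.py | search_element_and_replace
-- ===== SOURCE A (Python) =====
-- def sort_arr(array):
--     if len(array) <= 1:
--         return array
--
--     pivot = array[-1]
--     left = [x for x in array[:-1] if x <= pivot]
--     right = [x for x in array[:-1] if x > pivot]
--
--     return sort_arr(left) + [pivot] + sort_arr(right)
--
-- def search_element_and_replace(array, target, replacement):
--     if target not in array:
--         return "Element not found in given array"
--
--     for i in array:
--         if i == target:
--             array.remove(i)
--             array.append(replacement)
--     return f"Modified Array after replacing {target} with {replacement} : {sort_arr(array)}"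
-- ===== SOURCE B (Python) =====
-- def insertion_sorted(array):
--     result = []
--     for x in array:
--         i = 0
--         while i < len(result) and result[i] <= x:
--             i += 1
--         result.insert(i, x)
--     return result
--
-- def search_element_and_replace(array, target, replacement):
--     if target not in array:
--         return "Element not found in given array"
--
--     for i in array:
--         if i == target:
--             array.remove(i)
--             array.append(replacement)
--     return f"Modified Array after replacing {target} with {replacement} : {insertion_sorted(array)}"
-- ===== Notes on version B (the rewrite author's own statement) =====
-- stated objective: alternative
-- what changed: Replaces the recursive last-element-pivot quicksort helper by an iterative insertion sort that builds a new sorted list by shifting each element into position; the search/replace logic and the formatting are unchanged.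
import Mathlib
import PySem

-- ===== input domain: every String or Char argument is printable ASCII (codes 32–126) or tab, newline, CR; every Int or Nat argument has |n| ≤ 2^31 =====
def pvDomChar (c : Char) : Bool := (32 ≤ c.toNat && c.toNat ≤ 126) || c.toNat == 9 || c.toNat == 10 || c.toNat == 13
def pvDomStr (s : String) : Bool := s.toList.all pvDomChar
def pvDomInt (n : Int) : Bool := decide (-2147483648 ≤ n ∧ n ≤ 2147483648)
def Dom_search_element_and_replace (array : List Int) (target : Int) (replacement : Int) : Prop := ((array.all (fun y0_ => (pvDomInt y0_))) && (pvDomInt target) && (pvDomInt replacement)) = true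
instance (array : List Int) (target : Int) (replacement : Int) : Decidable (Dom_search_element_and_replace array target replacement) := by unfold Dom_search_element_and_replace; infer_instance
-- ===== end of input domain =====

-- B swaps the recursive last-element-pivot quicksort helper for an iterative insertion sort
-- building a new sorted list; replace logic and formatting unchanged (both mutate `array` in Python;
-- the equivalence proved here is about the return value).


-- ===== PORT A =====

-- A's recursive quicksort (`.getD 0` only totalizes the impossible IndexError on array[-1])
def sort_arr (a : List Int) : List Int :=
  if a.length ≤ 1 then a
  else
    let pivot := (PySem.List.pyGet? a (-1)).getD 0
    let init := PySem.List.slice a none (some (-1))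
    sort_arr (init.filter (fun x => x ≤ pivot)) ++ [pivot] ++
      sort_arr (init.filter (fun x => pivot < x))
termination_by a.length
decreasing_by
  all_goals
    simp only [PySem.List.slice_to_neg_one]
    have h1 := List.length_filter_le (l := a.dropLast) (p := fun x => decide (x ≤ (PySem.List.pyGet? a (-1)).getD 0))
    have h2 := List.length_filter_le (l := a.dropLast) (p := fun x => decide ((PySem.List.pyGet? a (-1)).getD 0 < x))
    simp only [List.length_dropLast] at h1 h2
    omega

-- the f-string's `{list}` (Python repr of a list of ints)
def pyListRepr (l : List Int) : String :=
  "[" ++ String.intercalate ", " (l.map PySem.Int.toStr) ++ "]"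

-- Python's `for i in array:` over the list the loop itself mutates: an index cursor read each
-- step (fuel = the list's initial length bounds the iteration count)
def replace_loop (t r : Int) : Nat → Nat → List Int → List Int
  | 0, _, a => a
  | fuel+1, idx, a =>
    match PySem.List.pyGet? a (idx : Int) with
    | none => a
    | some x =>
      if x = t then
        replace_loop t r fuel (idx+1) (((PySem.List.remove? a x).getD a) ++ [r])
      else
        replace_loop t r fuel (idx+1) a

def search_element_and_replace (array : List Int) (target : Int) (replacement : Int) : String :=
  if ! array.contains target then "Element not found in given array"
  else
    let arr2 := replace_loop target replacement array.length 0 array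
    "Modified Array after replacing " ++ PySem.Int.toStr target ++ " with " ++
      PySem.Int.toStr replacement ++ " : " ++ pyListRepr (sort_arr arr2)

-- ===== PORT B =====

-- B's inner `while i < len(result) and result[i] <= x: i += 1` scan for the insertion position
def insPos : List Int → Int → Nat
  | [], _ => 0
  | y :: ys, x => if y ≤ x then insPos ys x + 1 else 0

-- B's insertion sort: `result.insert(i, x)` for each x of the input, over a fresh list
def insertion_sorted (a : List Int) : List Int :=
  a.foldl (fun res x => PySem.List.insert res ((insPos res x : Nat) : Int) x) []

-- B's replace loop (same Python code as in A; transcribed with an explicit bound check)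
def replace_scan (t r : Int) : Nat → Nat → List Int → List Int
  | 0, _, a => a
  | fuel+1, idx, a =>
    if h : idx < a.length then
      replace_scan t r fuel (idx+1)
        (if a[idx] = t then ((PySem.List.remove? a a[idx]).getD a) ++ [r] else a)
    else a

def search_element_and_replace_alt (array : List Int) (target : Int) (replacement : Int) : String :=
  if ! array.contains target then "Element not found in given array"
  else
    let arr2 := replace_scan target replacement array.length 0 array
    "Modified Array after replacing " ++ PySem.Int.toStr target ++ " with " ++
      PySem.Int.toStr replacement ++ " : " ++
      ("[" ++ String.intercalate ", " ((insertion_sorted arr2).map PySem.Int.toStr) ++ "]")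

-- ===== PRECONDITION & SPEC =====
def Spec_search_element_and_replace (array : List Int) (target : Int) (replacement : Int) (out : String) : Prop := out = search_element_and_replace_alt array target replacement
instance (array : List Int) (target : Int) (replacement : Int) (out : String) : Decidable (Spec_search_element_and_replace array target replacement out) := by unfold Spec_search_element_and_replace; infer_instance

-- ===== CLAIM (what is proved, stated in full; the proofs are below) =====
def Claim_equal_search_element_and_replace : Prop := ∀ (array : List Int) (target : Int) (replacement : Int), Dom_search_element_and_replace array target replacement → Spec_search_element_and_replace array target replacement (search_element_and_replace array target replacement)

-- ===== LEMMAS AND PROOFS =====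

-- the two transcriptions of the (shared) replace loop coincide
theorem replace_scan_eq_loop (t r : Int) :
    ∀ (fuel idx : Nat) (a : List Int),
      replace_scan t r fuel idx a = replace_loop t r fuel idx a := by
  intro fuel
  induction fuel with
  | zero => intro idx a; rfl
  | succ fuel ih =>
    intro idx a
    rw [replace_scan, replace_loop, PySem.List.pyGet?_natCast]
    by_cases h : idx < a.length
    · rw [dif_pos h, List.getElem?_eq_getElem h]
      by_cases hx : a[idx] = t
      · simp only [if_pos hx, ih]
      · simp only [if_neg hx, ih]
    · rw [dif_neg h, List.getElem?_eq_none (by omega)]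

theorem insPos_le (res : List Int) (x : Int) : insPos res x ≤ res.length := by
  induction res with
  | nil => simp [insPos]
  | cons y ys ih =>
    rw [insPos]
    by_cases h : y ≤ x
    · simp only [if_pos h, List.length_cons]; omega
    · simp [if_neg h]

theorem insert_insPos (res : List Int) (x : Int) :
    PySem.List.insert res ((insPos res x : Nat) : Int) x
      = res.take (insPos res x) ++ x :: res.drop (insPos res x) :=
  PySem.List.insert_natCast res (insPos res x) x (insPos_le res x)

theorem insert_insPos_perm (res : List Int) (x : Int) :
    (PySem.List.insert res ((insPos res x : Nat) : Int) x).Perm (x :: res) := by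
  rw [insert_insPos]
  exact (List.perm_middle).trans (by rw [List.take_append_drop])

theorem insert_insPos_pairwise (res : List Int) (x : Int)
    (h : res.Pairwise (· ≤ ·)) :
    (PySem.List.insert res ((insPos res x : Nat) : Int) x).Pairwise (· ≤ ·) := by
  induction res with
  | nil => rw [insert_insPos]; simp [insPos]
  | cons y ys ih =>
    rw [insert_insPos, insPos]
    by_cases hy : y ≤ x
    · simp only [if_pos hy, List.take_succ_cons, List.drop_succ_cons, List.cons_append]
      rw [List.pairwise_cons]
      rw [List.pairwise_cons] at h
      refine ⟨?_, by rw [← insert_insPos]; exact ih h.2⟩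
      intro z hz
      have hz' : z ∈ x :: ys := by
        have := (insert_insPos_perm ys x).mem_iff.mp (by rw [insert_insPos] at *; exact hz)
        exact this
      rcases List.mem_cons.mp hz' with hz' | hz'
      · exact hz' ▸ hy
      · exact h.1 z hz'
    · simp only [if_neg hy, List.take_zero, List.drop_zero, List.nil_append]
      rw [List.pairwise_cons]
      refine ⟨?_, h⟩
      intro z hz
      rcases List.mem_cons.mp hz with hz | hz
      · have : x ≤ y := le_of_lt (lt_of_not_ge hy)
        exact hz ▸ this
      · rw [List.pairwise_cons] at h
        exact le_trans (le_of_lt (lt_of_not_ge hy)) (h.1 z hz)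

-- insertion_sorted returns a sorted permutation of its input
theorem insertion_sorted_spec (a : List Int) :
    (insertion_sorted a).Perm a ∧ (insertion_sorted a).Pairwise (· ≤ ·) := by
  suffices H : ∀ (a : List Int) (res : List Int), res.Pairwise (· ≤ ·) →
      (a.foldl (fun res x => PySem.List.insert res ((insPos res x : Nat) : Int) x) res).Perm
        (res ++ a) ∧
      (a.foldl (fun res x => PySem.List.insert res ((insPos res x : Nat) : Int) x) res).Pairwise
        (· ≤ ·) by
    have := H a [] (by simp)
    simpa [insertion_sorted] using this
  intro a
  induction a with
  | nil =>
    intro res h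
    simp only [List.foldl_nil, List.append_nil]
    exact ⟨List.Perm.refl res, h⟩
  | cons x xs ih =>
    intro res h
    simp only [List.foldl_cons]
    obtain ⟨hp, hs⟩ := ih _ (insert_insPos_pairwise res x h)
    refine ⟨hp.trans ?_, hs⟩
    exact ((insert_insPos_perm res x).append_right xs).trans List.perm_middle.symm

-- `sort_arr` is also a sorted permutation of its input …
-- the complement split of A's two comprehensions
theorem filter_split (l : List Int) (pivot : Int) :
    (l.filter (fun x => x ≤ pivot) ++ l.filter (fun x => pivot < x)).Perm l := by
  have hc : l.filter (fun x => pivot < x)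
      = l.filter (fun x => !decide (x ≤ pivot)) := by
    apply List.filter_congr
    intro x _
    by_cases hxp : x ≤ pivot
    · simp [hxp, not_lt.mpr hxp]
    · simp [hxp, lt_of_not_ge hxp]
  rw [hc]
  exact List.filter_append_perm _ l

theorem sort_arr_unfold (a : List Int) (h1 : ¬ a.length ≤ 1) (ha : a ≠ []) :
    sort_arr a
      = sort_arr (a.dropLast.filter (fun x => x ≤ a.getLast ha)) ++ [a.getLast ha] ++
          sort_arr (a.dropLast.filter (fun x => a.getLast ha < x)) := by
  rw [sort_arr, if_neg h1]
  simp only [PySem.List.slice_to_neg_one, PySem.List.pyGet?_neg_one,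
    List.getLast?_eq_some_getLast ha, Option.getD_some]

theorem sort_arr_perm (a : List Int) : (sort_arr a).Perm a := by
  suffices H : ∀ n (a : List Int), a.length ≤ n → (sort_arr a).Perm a from H _ a le_rfl
  intro n
  induction n with
  | zero =>
    intro a ha
    rw [sort_arr, if_pos (by omega)]
  | succ n ih =>
    intro a ha
    by_cases h1 : a.length ≤ 1
    · rw [sort_arr, if_pos h1]
    · have ha' : a ≠ [] := by intro h; rw [h] at h1; simp at h1
      rw [sort_arr_unfold a h1 ha']
      have hlen : a.dropLast.length = a.length - 1 := List.length_dropLast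
      have hL : (a.dropLast.filter (fun x => x ≤ a.getLast ha')).length ≤ n := by
        have := List.length_filter_le (fun x => decide (x ≤ a.getLast ha')) a.dropLast
        omega
      have hR : (a.dropLast.filter (fun x => a.getLast ha' < x)).length ≤ n := by
        have := List.length_filter_le (fun x => decide (a.getLast ha' < x)) a.dropLast
        omega
      refine ((((ih _ hL).append (List.Perm.refl [a.getLast ha'])).append (ih _ hR)).trans ?_)
      have s1 : ((a.dropLast.filter (fun x => x ≤ a.getLast ha') ++ [a.getLast ha'])
            ++ a.dropLast.filter (fun x => a.getLast ha' < x)).Perm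
          ((a.dropLast.filter (fun x => x ≤ a.getLast ha')
              ++ a.dropLast.filter (fun x => a.getLast ha' < x)) ++ [a.getLast ha']) := by
        rw [List.append_assoc, List.append_assoc]
        exact List.Perm.append_left _ (List.perm_append_comm)
      have s2 : ((a.dropLast.filter (fun x => x ≤ a.getLast ha')
              ++ a.dropLast.filter (fun x => a.getLast ha' < x)) ++ [a.getLast ha']).Perm a := by
        refine ((filter_split a.dropLast (a.getLast ha')).append (List.Perm.refl _)).trans ?_
        rw [List.dropLast_append_getLast ha']
      exact s1.trans s2

theorem sort_arr_pairwise (a : List Int) : (sort_arr a).Pairwise (· ≤ ·) := by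
  suffices H : ∀ n (a : List Int), a.length ≤ n → (sort_arr a).Pairwise (· ≤ ·) from
    H _ a le_rfl
  intro n
  induction n with
  | zero =>
    intro a ha
    rw [sort_arr, if_pos (by omega)]
    have : a = [] := List.length_eq_zero_iff.mp (by omega)
    simp [this]
  | succ n ih =>
    intro a ha
    by_cases h1 : a.length ≤ 1
    · rw [sort_arr, if_pos h1]
      rcases a with _ | ⟨x, _ | ⟨y, l⟩⟩
      · simp
      · simp
      · simp at h1
    · have ha' : a ≠ [] := by intro h; rw [h] at h1; simp at h1
      rw [sort_arr_unfold a h1 ha']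
      have hlen : a.dropLast.length = a.length - 1 := List.length_dropLast
      have hL : (a.dropLast.filter (fun x => x ≤ a.getLast ha')).length ≤ n := by
        have := List.length_filter_le (fun x => decide (x ≤ a.getLast ha')) a.dropLast
        omega
      have hR : (a.dropLast.filter (fun x => a.getLast ha' < x)).length ≤ n := by
        have := List.length_filter_le (fun x => decide (a.getLast ha' < x)) a.dropLast
        omega
      have hmemL : ∀ x ∈ sort_arr (a.dropLast.filter (fun y => y ≤ a.getLast ha')),
          x ≤ a.getLast ha' := by
        intro x hx
        have hx' := (sort_arr_perm _).mem_iff.mp hx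
        exact of_decide_eq_true (List.mem_filter.mp hx').2
      have hmemR : ∀ x ∈ sort_arr (a.dropLast.filter (fun y => a.getLast ha' < y)),
          a.getLast ha' < x := by
        intro x hx
        have hx' := (sort_arr_perm _).mem_iff.mp hx
        exact of_decide_eq_true (List.mem_filter.mp hx').2
      rw [List.pairwise_append]
      refine ⟨?_, ih _ hR, ?_⟩
      · rw [List.pairwise_append]
        refine ⟨ih _ hL, List.pairwise_singleton _ _, ?_⟩
        intro x hx y hy
        rw [List.mem_singleton] at hy
        exact hy ▸ hmemL x hx
      · intro x hx y hy
        rcases List.mem_append.mp hx with hx | hx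
        · exact le_of_lt (lt_of_le_of_lt (hmemL x hx) (hmemR y hy))
        · rw [List.mem_singleton] at hx
          exact le_of_lt (hx ▸ hmemR y hy)

-- … hence the two sorts agree: both equal Python's sorted()
theorem sort_arr_eq_insertion_sorted (a : List Int) :
    sort_arr a = insertion_sorted a := by
  obtain ⟨hp, hs⟩ := insertion_sorted_spec a
  calc sort_arr a
      = PySem.List.sorted a (fun x => x) false :=
        (PySem.List.sorted_id_eq_of_perm_of_pairwise a (sort_arr a)
          (sort_arr_perm a) (sort_arr_pairwise a)).symm
    _ = insertion_sorted a :=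
        PySem.List.sorted_id_eq_of_perm_of_pairwise a (insertion_sorted a) hp hs

-- ===== VERDICT (by name: the statement is the Claim_ definition above) =====
theorem search_element_and_replace_spec : Claim_equal_search_element_and_replace := by
  intro array target replacement _
  unfold Spec_search_element_and_replace
  unfold search_element_and_replace search_element_and_replace_alt
  by_cases ht : target ∈ array
  · simp only [List.contains_eq_mem, ht, decide_true, Bool.not_true, Bool.false_eq_true,
      if_false]
    rw [replace_scan_eq_loop, sort_arr_eq_insertion_sorted, pyListRepr]
  · simp [List.contains_eq_mem, ht]
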